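-- pv_equiv track=rewrite | github.com/nivu235/artificial_intelligence | 4. cryptic arithmetic.py | is_solution_valid
-- ===== SOURCE A (Python) =====
-- def is_solution_valid(mapping, words, result):
--     values = []
--     for word in words + [result]:
--         value = 0
--         for char in word:
--             value = value * 10 + mapping[char]
--         values.append(value)
--     return sum(values[:-1]) == values[-1]
-- ===== SOURCE B (Python) =====
-- def is_solution_valid(mapping, words, result):
--     coeff = {}
--
--     def tally(word, sign):
--         p = 1
--         for ch in reversed(word):
--             coeff[ch] = coeff.get(ch, 0) + sign * p
--             p *= 10
--
--     for word in words:
--         tally(word, 1)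
--     tally(result, -1)
--     total = 0
--     for ch, c in coeff.items():
--         total += mapping[ch] * c
--     return total == 0
-- ===== Notes on version B (the rewrite author's own statement) =====
-- stated objective: alternative
-- what changed: Instead of evaluating each word by Horner's rule and comparing the sum of addend values with the result value, B builds one coefficient dictionary giving each letter its net positional weight (+10^i for addends, -10^i for the result) and checks that the mapping-weighted sum of these coefficients is zero.
import Mathlib
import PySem

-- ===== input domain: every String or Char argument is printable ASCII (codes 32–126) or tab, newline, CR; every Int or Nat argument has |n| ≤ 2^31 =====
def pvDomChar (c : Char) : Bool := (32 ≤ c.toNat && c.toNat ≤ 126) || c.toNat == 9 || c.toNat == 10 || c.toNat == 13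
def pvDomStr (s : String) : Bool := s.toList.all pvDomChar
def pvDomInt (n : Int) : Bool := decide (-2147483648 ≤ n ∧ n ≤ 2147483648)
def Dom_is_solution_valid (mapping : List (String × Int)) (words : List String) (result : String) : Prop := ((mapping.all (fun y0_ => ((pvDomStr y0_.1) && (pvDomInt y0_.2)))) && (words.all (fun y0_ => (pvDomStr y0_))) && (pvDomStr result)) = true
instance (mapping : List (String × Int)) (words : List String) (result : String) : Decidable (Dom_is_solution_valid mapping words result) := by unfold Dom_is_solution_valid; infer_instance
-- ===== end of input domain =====

-- B replaces A's "compute each word's value by Horner, then compare sums" with a single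
-- coefficient dictionary (positional weight per letter, result weighted negatively) whose
-- weighted sum against the mapping is tested for zero — a different decomposition, similar cost.

-- ===== PORT A =====
-- inner loop 'for char in word: value = value*10 + mapping[char]' (none = KeyError)
def pvValA (mapping : List (String × Int)) (cs : List Char) : Option Int :=
  cs.foldl (fun v? c => v?.bind fun v =>
    ((PySem.Dict.mk mapping).get? (String.ofList [c])).map (fun d => v * 10 + d)) (some 0)

def is_solution_valid (mapping : List (String × Int)) (words : List String) (result : String) : Bool :=
  let values? := (words ++ [result]).foldl (fun vals? w =>
    vals?.bind fun vals => (pvValA mapping w.toList).map (fun v => vals ++ [v])) (some [])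
  match values? with
  | none => false   -- KeyError: excluded by Pre_
  | some values =>
    match PySem.List.pyGet? values (-1) with
    | none => false
    | some last => decide ((PySem.List.slice values none (some (-1))).sum = last)

-- ===== PORT B =====
-- 'p = 1; for ch in reversed(word): coeff[ch] = coeff.get(ch, 0) + sign*p; p *= 10'
def pvTally (coeff : PySem.Dict String Int) (cs : List Char) (sign : Int) : PySem.Dict String Int :=
  (cs.reverse.foldl (fun (st : PySem.Dict String Int × Int) c =>
      (st.1.insert (String.ofList [c]) (st.1.getD (String.ofList [c]) 0 + sign * st.2), st.2 * 10))
    (coeff, 1)).1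

def is_solution_valid_alt (mapping : List (String × Int)) (words : List String) (result : String) : Bool :=
  let coeff := words.foldl (fun d w => pvTally d w.toList 1) PySem.Dict.empty
  let coeff := pvTally coeff result.toList (-1)
  let total? := coeff.items.foldl (fun t? (kv : String × Int) =>
      t?.bind fun t => ((PySem.Dict.mk mapping).get? kv.1).map (fun m => t + m * kv.2)) (some 0)
  match total? with
  | none => false   -- KeyError: excluded by Pre_
  | some t => decide (t = 0)

-- ===== PRECONDITION & SPEC =====
-- Pre_ excludes exactly the inputs where Python's A raises KeyError: some character of a
-- word (or of result) is not a key of mapping.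
def Pre_is_solution_valid (mapping : List (String × Int)) (words : List String) (result : String) : Prop :=
  ((words.all fun w => w.toList.all fun c => (PySem.Dict.mk mapping).contains (String.ofList [c]))
    && (result.toList.all fun c => (PySem.Dict.mk mapping).contains (String.ofList [c]))) = true

instance (mapping : List (String × Int)) (words : List String) (result : String) : Decidable (Pre_is_solution_valid mapping words result) := by unfold Pre_is_solution_valid; infer_instance

def pvWitness_is_solution_valid : (List (String × Int)) × List String × String :=
  ([("a", 1), ("b", 2)], ["ab", "b"], "ba")

def Spec_is_solution_valid (mapping : List (String × Int)) (words : List String) (result : String) (out : Bool) : Prop := out = is_solution_valid_alt mapping words result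
instance (mapping : List (String × Int)) (words : List String) (result : String) (out : Bool) : Decidable (Spec_is_solution_valid mapping words result out) := by unfold Spec_is_solution_valid; infer_instance

-- ===== CLAIM (what is proved, stated in full; the proofs are below) =====
def Claim_equal_is_solution_valid : Prop := ∀ (mapping : List (String × Int)) (words : List String) (result : String), Dom_is_solution_valid mapping words result → Pre_is_solution_valid mapping words result → Spec_is_solution_valid mapping words result (is_solution_valid mapping words result)

-- ===== LEMMAS AND PROOFS =====

-- the mapping value of a key (meaningful under Pre_, where the key is present)
def pvF (mapping : List (String × Int)) (k : String) : Int :=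
  ((PySem.Dict.mk mapping).get? k).getD 0

-- A's Horner value of a word
def pvVal (mapping : List (String × Int)) (cs : List Char) : Int :=
  cs.foldl (fun v c => v * 10 + pvF mapping (String.ofList [c])) 0

-- little-endian value (what B's reversed loop reads)
def pvLittle (mapping : List (String × Int)) (cs : List Char) : Int :=
  cs.foldr (fun c acc => pvF mapping (String.ofList [c]) + 10 * acc) 0

-- the weighted sum of a coefficient dictionary
def pvS (mapping : List (String × Int)) (d : PySem.Dict String Int) : Int :=
  (d.items.map (fun p => pvF mapping p.1 * p.2)).sum

theorem pvVal_from (mapping : List (String × Int)) (cs : List Char) (a : Int) :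
    cs.foldl (fun v c => v * 10 + pvF mapping (String.ofList [c])) a
      = a * 10 ^ cs.length + pvVal mapping cs := by
  induction cs generalizing a with
  | nil => simp [pvVal]
  | cons c cs ih =>
    simp only [List.foldl_cons, List.length_cons, pvVal]
    rw [ih, ih (0 * 10 + pvF mapping (String.ofList [c]))]
    ring

theorem pvLittle_init (mapping : List (String × Int)) (cs : List Char) (b : Int) :
    cs.foldr (fun c acc => pvF mapping (String.ofList [c]) + 10 * acc) b
      = pvLittle mapping cs + 10 ^ cs.length * b := by
  induction cs with
  | nil => simp [pvLittle]
  | cons c cs ih => simp only [List.foldr_cons, List.length_cons, pvLittle] at *; rw [ih]; ring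

theorem pvLittle_reverse (mapping : List (String × Int)) (cs : List Char) :
    pvLittle mapping cs.reverse = pvVal mapping cs := by
  induction cs with
  | nil => rfl
  | cons c cs ih =>
    have h : pvVal mapping (c :: cs)
        = pvF mapping (String.ofList [c]) * 10 ^ cs.length + pvVal mapping cs := by
      simp only [pvVal, List.foldl_cons, zero_mul, zero_add]
      exact pvVal_from mapping cs _
    rw [List.reverse_cons]
    simp only [pvLittle, List.foldr_append, List.foldr_cons, List.foldr_nil]
    rw [pvLittle_init, List.length_reverse]
    rw [ih, h]
    ring

-- replacing the unique item keyed k in a nodup association list shifts the weighted sum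
theorem pvSum_replace (mapping : List (String × Int)) (l : List (String × Int))
    (k : String) (v w : Int) (hnd : (l.map (·.1)).Nodup) (hmem : (k, w) ∈ l) :
    ((l.map (fun p => if p.1 == k then (k, v) else p)).map (fun p => pvF mapping p.1 * p.2)).sum
      = (l.map (fun p => pvF mapping p.1 * p.2)).sum - pvF mapping k * w + pvF mapping k * v := by
  induction l with
  | nil => cases hmem
  | cons p l ih =>
    simp only [List.map_cons, List.nodup_cons] at hnd ⊢
    by_cases hk : p.1 = k
    · subst hk
      have hw : w = p.2 := by
        rcases List.mem_cons.1 hmem with h | h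
        · exact (congrArg Prod.snd h)
        · exact absurd (List.mem_map.2 ⟨(p.1, w), h, rfl⟩) hnd.1
      have htl : l.map (fun q => if q.1 == p.1 then (p.1, v) else q) = l := by
        refine (List.map_congr_left ?_).trans (List.map_id l)
        intro q hq
        have hne : q.1 ≠ p.1 := fun h => hnd.1 (List.mem_map.2 ⟨q, hq, h⟩)
        simp [hne]
      simp only [htl, beq_self_eq_true, if_true, List.sum_cons, hw]
      ring
    · have hmem' : (k, w) ∈ l := by
        rcases List.mem_cons.1 hmem with h | h
        · exact absurd (congrArg Prod.fst h.symm) hk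
        · exact h
      have hb : (p.1 == k) = false := by simp [hk]
      simp only [hb, Bool.false_eq_true, if_false, List.sum_cons,
        ih hnd.2 hmem']
      ring

theorem pvS_insert (mapping : List (String × Int)) (d : PySem.Dict String Int)
    (k : String) (x : Int) (hnd : d.keys.Nodup) :
    pvS mapping (d.insert k (d.getD k 0 + x)) = pvS mapping d + pvF mapping k * x := by
  by_cases hc : d.contains k = true
  · obtain ⟨w, hw⟩ : ∃ w, d.get? k = some w := by
      rw [PySem.Dict.contains_eq_isSome_get?] at hc
      exact Option.isSome_iff_exists.1 hc
    have hmem : (k, w) ∈ d.items := PySem.Dict.mem_items_of_get?_eq_some d hw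
    have hgd : d.getD k 0 = w := PySem.Dict.getD_of_get?_eq_some d 0 hw
    rw [pvS, PySem.Dict.items_insert_of_contains d _ hc,
      pvSum_replace mapping d.items k _ w hnd hmem]
    rw [pvS, hgd]; ring
  · have hc' : d.contains k = false := by simpa using hc
    have hgd : d.getD k 0 = 0 := PySem.Dict.getD_of_not_contains d 0 hc'
    rw [pvS, PySem.Dict.items_insert_of_not_contains d _ hc']
    simp only [List.map_append, List.sum_append, List.map_cons, List.map_nil,
      List.sum_cons, List.sum_nil, hgd, pvS]
    ring

-- B's inner reversed loop, as a fold over an arbitrary char list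
theorem pvTally_loop (mapping : List (String × Int)) (cs : List Char)
    (d : PySem.Dict String Int) (p sign : Int) (hnd : d.keys.Nodup) :
    pvS mapping ((cs.foldl (fun (st : PySem.Dict String Int × Int) c =>
        (st.1.insert (String.ofList [c]) (st.1.getD (String.ofList [c]) 0 + sign * st.2), st.2 * 10))
      (d, p)).1) = pvS mapping d + sign * p * pvLittle mapping cs := by
  induction cs generalizing d p with
  | nil => simp [pvLittle]
  | cons c cs ih =>
    simp only [List.foldl_cons]
    rw [ih _ _ (PySem.Dict.nodup_keys_insert d _ _ hnd),
      pvS_insert mapping d _ _ hnd]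
    simp only [pvLittle, List.foldr_cons]
    rw [← pvLittle]
    ring

theorem pvTally_nodup_loop (cs : List Char) (d : PySem.Dict String Int) (p sign : Int)
    (hnd : d.keys.Nodup) :
    ((cs.foldl (fun (st : PySem.Dict String Int × Int) c =>
        (st.1.insert (String.ofList [c]) (st.1.getD (String.ofList [c]) 0 + sign * st.2), st.2 * 10))
      (d, p)).1).keys.Nodup := by
  induction cs generalizing d p with
  | nil => exact hnd
  | cons c cs ih => exact ih _ _ (PySem.Dict.nodup_keys_insert d _ _ hnd)

theorem pvTally_keys_loop (cs : List Char) (d : PySem.Dict String Int) (p sign : Int)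
    (k : String)
    (hk : k ∈ ((cs.foldl (fun (st : PySem.Dict String Int × Int) c =>
        (st.1.insert (String.ofList [c]) (st.1.getD (String.ofList [c]) 0 + sign * st.2), st.2 * 10))
      (d, p)).1).keys) :
    k ∈ d.keys ∨ ∃ c ∈ cs, k = String.ofList [c] := by
  induction cs generalizing d p with
  | nil => exact Or.inl hk
  | cons c cs ih =>
    rcases ih _ _ hk with h | ⟨c', hc', rfl⟩
    · rcases (PySem.Dict.mem_keys_insert _ _ _ _).1 h with h | h
      · exact Or.inr ⟨c, List.mem_cons_self, h⟩
      · exact Or.inl h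
    · exact Or.inr ⟨c', List.mem_cons_of_mem _ hc', rfl⟩

theorem pvS_tally (mapping : List (String × Int)) (d : PySem.Dict String Int)
    (cs : List Char) (sign : Int) (hnd : d.keys.Nodup) :
    pvS mapping (pvTally d cs sign) = pvS mapping d + sign * pvVal mapping cs := by
  rw [pvTally, pvTally_loop mapping _ _ _ _ hnd, pvLittle_reverse]
  ring

theorem pvTally_nodup (d : PySem.Dict String Int) (cs : List Char) (sign : Int)
    (hnd : d.keys.Nodup) : (pvTally d cs sign).keys.Nodup :=
  pvTally_nodup_loop _ _ _ _ hnd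

theorem pvTally_keys (d : PySem.Dict String Int) (cs : List Char) (sign : Int)
    (k : String) (hk : k ∈ (pvTally d cs sign).keys) :
    k ∈ d.keys ∨ ∃ c ∈ cs, k = String.ofList [c] := by
  rcases pvTally_keys_loop _ _ _ _ _ hk with h | ⟨c, hc, rfl⟩
  · exact Or.inl h
  · exact Or.inr ⟨c, List.mem_reverse.1 hc, rfl⟩

-- the words loop of B
theorem pvWordsFold (mapping : List (String × Int)) (words : List String)
    (d : PySem.Dict String Int) (hnd : d.keys.Nodup) :
    pvS mapping (words.foldl (fun d w => pvTally d w.toList 1) d)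
        = pvS mapping d + (words.map (fun w => pvVal mapping w.toList)).sum
      ∧ (words.foldl (fun d w => pvTally d w.toList 1) d).keys.Nodup
      ∧ ∀ k ∈ (words.foldl (fun d w => pvTally d w.toList 1) d).keys,
          k ∈ d.keys ∨ ∃ w ∈ words, ∃ c ∈ w.toList, k = String.ofList [c] := by
  induction words generalizing d with
  | nil => exact ⟨by simp, hnd, fun k hk => Or.inl hk⟩
  | cons w ws ih =>
    obtain ⟨h1, h2, h3⟩ := ih (pvTally d w.toList 1) (pvTally_nodup _ _ _ hnd)
    refine ⟨?_, h2, ?_⟩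
    · simp only [List.foldl_cons, List.map_cons, List.sum_cons, h1,
        pvS_tally mapping d w.toList 1 hnd]
      ring
    · intro k hk
      rcases h3 k hk with h | h
      · rcases pvTally_keys _ _ _ _ h with h' | ⟨c, hc, rfl⟩
        · exact Or.inl h'
        · exact Or.inr ⟨w, List.mem_cons_self, c, hc, rfl⟩
      · obtain ⟨w', hw', hc⟩ := h
        exact Or.inr ⟨w', List.mem_cons_of_mem _ hw', hc⟩

-- B's final summation loop
theorem pvTotalFold (mapping : List (String × Int)) (l : List (String × Int)) (a : Int)
    (h : ∀ p ∈ l, ((PySem.Dict.mk mapping).get? p.1).isSome = true) :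
    l.foldl (fun t? (kv : String × Int) =>
        t?.bind fun t => ((PySem.Dict.mk mapping).get? kv.1).map (fun m => t + m * kv.2)) (some a)
      = some (a + (l.map (fun p => pvF mapping p.1 * p.2)).sum) := by
  induction l generalizing a with
  | nil => simp
  | cons p l ih =>
    obtain ⟨m, hm⟩ := Option.isSome_iff_exists.1 (h p List.mem_cons_self)
    simp only [List.foldl_cons, hm, Option.bind_some, Option.map_some]
    rw [ih _ (fun q hq => h q (List.mem_cons_of_mem _ hq))]
    simp only [List.map_cons, List.sum_cons, pvF, hm, Option.getD_some]
    ring_nf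

-- A's inner loop under Pre_
theorem pvValA_eq (mapping : List (String × Int)) (cs : List Char) (a : Int)
    (h : ∀ c ∈ cs, (PySem.Dict.mk mapping).contains (String.ofList [c]) = true) :
    cs.foldl (fun v? c => v?.bind fun v =>
        ((PySem.Dict.mk mapping).get? (String.ofList [c])).map (fun d => v * 10 + d)) (some a)
      = some (cs.foldl (fun v c => v * 10 + pvF mapping (String.ofList [c])) a) := by
  induction cs generalizing a with
  | nil => rfl
  | cons c cs ih =>
    have hsome : ((PySem.Dict.mk mapping).get? (String.ofList [c])).isSome = true := by
      rw [← PySem.Dict.contains_eq_isSome_get? (PySem.Dict.mk mapping) (String.ofList [c])]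
      exact h c List.mem_cons_self
    obtain ⟨m, hm⟩ := Option.isSome_iff_exists.1 hsome
    simp only [List.foldl_cons, hm, Option.bind_some, Option.map_some]
    rw [ih _ (fun c' hc' => h c' (List.mem_cons_of_mem _ hc'))]
    simp [pvF, hm]

-- A's outer loop under Pre_
theorem pvValuesFold (mapping : List (String × Int)) (ws : List String) (acc : List Int)
    (h : ∀ w ∈ ws, ∀ c ∈ w.toList, (PySem.Dict.mk mapping).contains (String.ofList [c]) = true) :
    ws.foldl (fun vals? w =>
        vals?.bind fun vals => (pvValA mapping w.toList).map (fun v => vals ++ [v])) (some acc)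
      = some (acc ++ ws.map (fun w => pvVal mapping w.toList)) := by
  induction ws generalizing acc with
  | nil => simp
  | cons w ws ih =>
    have hv : pvValA mapping w.toList = some (pvVal mapping w.toList) :=
      pvValA_eq mapping w.toList 0 (h w List.mem_cons_self)
    simp only [List.foldl_cons, hv, Option.bind_some, Option.map_some]
    rw [ih _ (fun w' hw' => h w' (List.mem_cons_of_mem _ hw'))]
    simp

-- ===== VERDICT (by name: the statement is the Claim_ definition above) =====
theorem is_solution_valid_spec : Claim_equal_is_solution_valid := by
  intro mapping words result _hdom hpre
  unfold Spec_is_solution_valid is_solution_valid is_solution_valid_alt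
  rw [Pre_is_solution_valid] at hpre
  simp only [Bool.and_eq_true, List.all_eq_true] at hpre
  obtain ⟨hw, hr⟩ := hpre
  -- A's side
  have hall : ∀ w ∈ words ++ [result], ∀ c ∈ w.toList,
      (PySem.Dict.mk mapping).contains (String.ofList [c]) = true := by
    intro w hwmem c hc
    rcases List.mem_append.1 hwmem with h | h
    · exact hw w h c hc
    · simp only [List.mem_singleton] at h; subst h; exact hr c hc
  rw [pvValuesFold mapping _ [] hall]
  simp only [List.nil_append, List.map_append, List.map_cons, List.map_nil]
  rw [PySem.List.pyGet?_neg_one_append_singleton, PySem.List.slice_to_neg_one]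
  simp only [List.dropLast_concat]
  -- B's side
  obtain ⟨h1, h2, h3⟩ := pvWordsFold mapping words PySem.Dict.empty
    (PySem.Dict.nodup_keys_empty)
  set coeff := (words.foldl (fun d w => pvTally d w.toList 1) PySem.Dict.empty) with hc
  have hS : pvS mapping (pvTally coeff result.toList (-1))
      = (words.map (fun w => pvVal mapping w.toList)).sum - pvVal mapping result.toList := by
    rw [pvS_tally mapping coeff result.toList (-1) h2, h1]
    rw [show pvS mapping (PySem.Dict.empty : PySem.Dict String Int) = 0 from rfl]
    ring
  have hkeys : ∀ p ∈ (pvTally coeff result.toList (-1)).items,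
      ((PySem.Dict.mk mapping).get? p.1).isSome = true := by
    intro p hp
    have hk : p.1 ∈ (pvTally coeff result.toList (-1)).keys :=
      PySem.Dict.mem_keys_of_mem_items _ hp
    have : (PySem.Dict.mk mapping).contains p.1 = true := by
      rcases pvTally_keys _ _ _ _ hk with h | ⟨c, hcm, hpe⟩
      · rcases h3 _ h with h' | ⟨w', hw', c, hcm, hpe⟩
        · simp [PySem.Dict.keys_empty] at h'
        · rw [hpe]; exact hw w' hw' c hcm
      · rw [hpe]; exact hr c hcm
    rw [PySem.Dict.contains_eq_isSome_get?] at this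
    exact this
  rw [pvTotalFold mapping _ 0 hkeys]
  rw [pvS] at hS
  rw [hS]
  rw [decide_eq_decide]
  constructor <;> intro h' <;> omega
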